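-- pv_equiv track=rewrite | github.com/Shyam2277/ShadowFox | Task 1/Lists (Task 1).py | country_name
-- ===== SOURCE A (Python) =====
-- def country_name(city):
--     cities = {"Australia":["Sydney","Melbourne","Brisbane","Perth"],
--               "UAE":["Dubai","Abu Dhabi","Sharjah","Ajman"],
--               "India":["Mumbai","Bangalore","Chennai","Delhi"]}
--     for country, city_list in cities.items():
--         if city in city_list:
--             return country
--     return "City not found in database"
-- ===== SOURCE B (Python) =====
-- def country_name(city):
--     city_to_country = {"Sydney": "Australia", "Melbourne": "Australia",
--                        "Brisbane": "Australia", "Perth": "Australia",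
--                        "Dubai": "UAE", "Abu Dhabi": "UAE",
--                        "Sharjah": "UAE", "Ajman": "UAE",
--                        "Mumbai": "India", "Bangalore": "India",
--                        "Chennai": "India", "Delhi": "India"}
--     return city_to_country.get(city, "City not found in database")
-- ===== Notes on version B (the rewrite author's own statement) =====
-- stated objective: idiomatic
-- what changed: Replaces the loop over country groups with an inner list scan by a single flat city-to-country dictionary and one direct lookup with a default.
import Mathlib
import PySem

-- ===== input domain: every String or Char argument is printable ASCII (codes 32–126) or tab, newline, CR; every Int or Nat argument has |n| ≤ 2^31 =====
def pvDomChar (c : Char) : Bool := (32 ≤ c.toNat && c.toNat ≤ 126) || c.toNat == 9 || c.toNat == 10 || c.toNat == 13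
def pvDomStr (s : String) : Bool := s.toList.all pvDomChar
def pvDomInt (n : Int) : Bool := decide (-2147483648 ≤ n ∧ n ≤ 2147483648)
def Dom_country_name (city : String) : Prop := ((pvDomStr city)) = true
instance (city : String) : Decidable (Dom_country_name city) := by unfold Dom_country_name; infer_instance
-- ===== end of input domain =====

-- B replaces A's loop over country groups (with an inner list-membership scan) by one flat
-- city→country dictionary and a single lookup with a default (idiomatic; same observable result).

-- ===== PORT A =====
-- the 'for country, city_list in cities.items(): if city in city_list: return country' loop
def countryLoopA (city : String) : List (String × List String) → String
  | [] => "City not found in database"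
  | (country, city_list) :: rest =>
      if city ∈ city_list then country else countryLoopA city rest

def country_name (city : String) : String :=
  let cities : PySem.Dict String (List String) :=
    PySem.Dict.ofList [("Australia", ["Sydney", "Melbourne", "Brisbane", "Perth"]),
                       ("UAE", ["Dubai", "Abu Dhabi", "Sharjah", "Ajman"]),
                       ("India", ["Mumbai", "Bangalore", "Chennai", "Delhi"])]
  countryLoopA city cities.items

-- ===== PORT B =====
def country_name_alt (city : String) : String :=
  let city_to_country : PySem.Dict String String :=
    PySem.Dict.ofList [("Sydney", "Australia"), ("Melbourne", "Australia"),
                       ("Brisbane", "Australia"), ("Perth", "Australia"),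
                       ("Dubai", "UAE"), ("Abu Dhabi", "UAE"),
                       ("Sharjah", "UAE"), ("Ajman", "UAE"),
                       ("Mumbai", "India"), ("Bangalore", "India"),
                       ("Chennai", "India"), ("Delhi", "India")]
  PySem.Dict.getD city_to_country city "City not found in database"

-- ===== PRECONDITION & SPEC =====
def Spec_country_name (city : String) (out : String) : Prop := out = country_name_alt city
instance (city : String) (out : String) : Decidable (Spec_country_name city out) := by unfold Spec_country_name; infer_instance

-- ===== CLAIM (what is proved, stated in full; the proofs are below) =====
def Claim_equal_country_name : Prop := ∀ (city : String), Dom_country_name city → Spec_country_name city (country_name city)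

-- ===== LEMMAS AND PROOFS =====

-- ===== VERDICT (by name: the statement is the Claim_ definition above) =====
theorem country_name_spec : Claim_equal_country_name := by
  intro city _
  unfold Spec_country_name country_name country_name_alt
  simp only [PySem.Dict.getD_eq_get?_getD]
  simp only [show (PySem.Dict.ofList [("Australia", ["Sydney", "Melbourne", "Brisbane", "Perth"]),
      ("UAE", ["Dubai", "Abu Dhabi", "Sharjah", "Ajman"]),
      ("India", ["Mumbai", "Bangalore", "Chennai", "Delhi"])] : PySem.Dict String (List String)).items
    = [("Australia", ["Sydney", "Melbourne", "Brisbane", "Perth"]),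
       ("UAE", ["Dubai", "Abu Dhabi", "Sharjah", "Ajman"]),
       ("India", ["Mumbai", "Bangalore", "Chennai", "Delhi"])] from by decide]
  simp only [show (PySem.Dict.ofList [("Sydney", "Australia"), ("Melbourne", "Australia"),
      ("Brisbane", "Australia"), ("Perth", "Australia"),
      ("Dubai", "UAE"), ("Abu Dhabi", "UAE"),
      ("Sharjah", "UAE"), ("Ajman", "UAE"),
      ("Mumbai", "India"), ("Bangalore", "India"),
      ("Chennai", "India"), ("Delhi", "India")] : PySem.Dict String String)
    = PySem.Dict.mk [("Sydney", "Australia"), ("Melbourne", "Australia"),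
      ("Brisbane", "Australia"), ("Perth", "Australia"),
      ("Dubai", "UAE"), ("Abu Dhabi", "UAE"),
      ("Sharjah", "UAE"), ("Ajman", "UAE"),
      ("Mumbai", "India"), ("Bangalore", "India"),
      ("Chennai", "India"), ("Delhi", "India")] from by decide]
  simp only [countryLoopA, PySem.Dict.get?]
  split_ifs with hA hU hI
  · obtain rfl | rfl | rfl | rfl := by simpa using hA
    all_goals decide
  · obtain rfl | rfl | rfl | rfl := by simpa using hU
    all_goals decide
  · obtain rfl | rfl | rfl | rfl := by simpa using hI
    all_goals decide
  · simp only [List.mem_cons, List.not_mem_nil, or_false, not_or] at hA hU hI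
    rw [List.find?_eq_none.mpr ?_]
    · rfl
    · intro p hp
      fin_cases hp <;> simp_all <;> exact fun h => absurd h.symm (by tauto)
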